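-- pv_equiv track=rewrite | github.com/MahmoudManfi/NumericalAnalysis | Interpolation/interpolation.py | check
-- ===== SOURCE A (Python) =====
-- def check(x, fx, n):
--     matrix = [x.copy(), fx.copy()]  # to save the order of x and fx
--     x.sort()
--     fx.sort()
--     size_x = len(x)
--     size_fx = len(fx)
--     if size_x != size_fx or size_x < 2 or n > size_x-1:
--         return False
--     for i in range(size_x-1):
--         if x[i] == x[i+1] : # or fx[i] == fx[i+1]:
--             return False
--     for i in range(size_x):
--         index = matrix[0].index(x[i],0,size_x)
--         fx[i] = matrix[1][index]
--     return True
-- ===== SOURCE B (Python) =====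
-- def check(x, fx, n):
--     ok = len(x) == len(fx) and len(x) >= 2 and n <= len(x) - 1 and len(set(x)) == len(x)
--     if ok:
--         pairs = sorted(zip(x, fx))
--         x[:] = [p[0] for p in pairs]
--         fx[:] = [p[1] for p in pairs]
--     return ok
-- ===== Notes on version B (the rewrite author's own statement) =====
-- stated objective: alternative
-- what changed: Replaces A's sort-then-adjacent-scan duplicate test and the per-element matrix[0].index() reorder loop by a set-cardinality distinctness check plus one sorted(zip(x,fx)) pass; B mutates the lists only on success (the equivalence proved is about the returned Bool).
import Mathlib
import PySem

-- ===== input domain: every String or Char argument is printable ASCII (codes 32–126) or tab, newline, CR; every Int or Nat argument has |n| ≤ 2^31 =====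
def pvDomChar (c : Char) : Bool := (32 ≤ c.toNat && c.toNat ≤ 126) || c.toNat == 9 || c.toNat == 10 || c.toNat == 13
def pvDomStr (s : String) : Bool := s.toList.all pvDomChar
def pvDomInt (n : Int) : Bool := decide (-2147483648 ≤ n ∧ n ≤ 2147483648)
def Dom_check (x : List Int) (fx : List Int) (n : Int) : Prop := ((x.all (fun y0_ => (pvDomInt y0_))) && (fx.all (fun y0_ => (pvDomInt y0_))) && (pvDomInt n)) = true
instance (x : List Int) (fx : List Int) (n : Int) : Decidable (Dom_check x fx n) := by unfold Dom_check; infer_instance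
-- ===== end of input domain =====

-- B replaces A's sort-then-adjacent-scan duplicate test and per-element index() reorder by a
-- set-cardinality distinctness test and one sorted zip (objective: alternative); both Pythons
-- mutate x and fx in place (A on every path, B only on success) and the theorems here are
-- about the returned Bool only.

-- ===== PORT A =====
-- early-return loop 'for i in range(size_x-1): if x[i] == x[i+1]: return False' on the sorted list
def checkDupLoop : List Int → Bool
  | a :: b :: t => a == b || checkDupLoop (b :: t)
  | _ => false

def check (x : List Int) (fx : List Int) (n : Int) : Bool :=
  let matrix0 := x            -- matrix = [x.copy(), fx.copy()]
  let matrix1 := fx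
  let xs := PySem.List.sorted x (fun v => v) false     -- x.sort()
  let fxs := PySem.List.sorted fx (fun v => v) false   -- fx.sort()
  let size_x := xs.length
  let size_fx := fxs.length
  if (size_x != size_fx) || (size_x < 2) || decide (n > (size_x : Int) - 1) then false
  else if checkDupLoop xs then false
  else
    -- final loop writes fx[i] = matrix[1][matrix[0].index(x[i])]: a mutation of fx only;
    -- the lookups always succeed (x[i] ∈ matrix[0]), and the result is not part of the return value
    let _fxFinal := xs.map (fun v =>
      (PySem.List.pyGet? matrix1 (((PySem.List.index? matrix0 v).getD 0 : Nat) : Int)).getD 0)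
    true

-- ===== PORT B =====
def check_alt (x : List Int) (fx : List Int) (n : Int) : Bool :=
  let ok := (x.length == fx.length) && (2 ≤ x.length) &&
            decide (n ≤ (x.length : Int) - 1) &&
            ((PySem.Set.ofList x).length == x.length)                  -- len(set(x)) == len(x)
  -- on success B sorts the pairs once and writes both lists back in place; not returned
  let _mut := if ok then (PySem.List.sorted2 (x.zip fx) Prod.fst Prod.snd false) else []
  ok

-- ===== PRECONDITION & SPEC =====
def Spec_check (x : List Int) (fx : List Int) (n : Int) (out : Bool) : Prop := out = check_alt x fx n
instance (x : List Int) (fx : List Int) (n : Int) (out : Bool) : Decidable (Spec_check x fx n out) := by unfold Spec_check; infer_instance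

-- ===== CLAIM =====
def Claim_equal_check : Prop := ∀ (x : List Int) (fx : List Int) (n : Int), Dom_check x fx n → Spec_check x fx n (check x fx n)

-- ===== LEMMAS AND PROOFS =====

-- the foldl building set(x) appends a sublist of its input
lemma foldl_add_sublist (xs : List Int) : ∀ s : List Int,
    ∃ t, xs.foldl PySem.Set.add s = s ++ t ∧ t.Sublist xs := by
  induction xs with
  | nil => intro s; exact ⟨[], by simp, List.Sublist.refl _⟩
  | cons a xs ih =>
    intro s
    simp only [List.foldl_cons]
    obtain ⟨t, ht, hsub⟩ := ih (PySem.Set.add s a)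
    by_cases h : a ∈ s
    · have hadd : PySem.Set.add s a = s := by simp [PySem.Set.add, h]
      exact ⟨t, by rw [ht, hadd], hsub.cons a⟩
    · have hadd : PySem.Set.add s a = s ++ [a] := by simp [PySem.Set.add, h]
      exact ⟨a :: t, by rw [ht, hadd]; simp, hsub.cons₂ a⟩

lemma ofList_length_iff (xs : List Int) :
    (PySem.Set.ofList xs).length = xs.length ↔ xs.Nodup := by
  constructor
  · intro h
    obtain ⟨t, ht, hsub⟩ := foldl_add_sublist xs []
    have hof : PySem.Set.ofList xs = t := by
      rw [PySem.Set.ofList_eq_foldl, ht]; simp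
    have hte : t = xs := hsub.eq_of_length (by rw [← hof]; exact h)
    have hnd := PySem.Set.nodup_ofList (xs := xs)
    rwa [hof, hte] at hnd
  · intro h
    exact congrArg List.length (PySem.Set.ofList_eq_self_of_nodup xs h)

-- on a ≤-sorted list, the adjacent-equality scan finds a duplicate iff the list is not Nodup
lemma dupLoop_iff (ys : List Int) (hp : ys.Pairwise (· ≤ ·)) :
    checkDupLoop ys = false ↔ ys.Nodup := by
  induction ys with
  | nil => simp [checkDupLoop]
  | cons a ys ih =>
    cases ys with
    | nil => simp [checkDupLoop]
    | cons b t =>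
      have hp' : (b :: t).Pairwise (· ≤ ·) := hp.tail
      have hab : a ≤ b := (List.pairwise_cons.mp hp).1 b (by simp)
      constructor
      · intro h
        simp only [checkDupLoop, Bool.or_eq_false_iff] at h
        obtain ⟨hne, hrest⟩ := h
        have hne' : a ≠ b := by simpa using hne
        have hnd : (b :: t).Nodup := (ih hp').mp hrest
        refine List.nodup_cons.mpr ⟨?_, hnd⟩
        intro hmem
        rcases List.mem_cons.mp hmem with h1 | h2
        · exact hne' h1
        · have hba : b ≤ a := (List.pairwise_cons.mp hp').1 a h2
          exact hne' (le_antisymm hab hba)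
      · intro h
        have h1 := List.nodup_cons.mp h
        simp only [checkDupLoop, Bool.or_eq_false_iff]
        have hne : a ≠ b := fun he => h1.1 (by rw [he]; exact List.mem_cons_self)
        exact ⟨by simpa using hne, (ih hp').mpr h1.2⟩

lemma dup_sorted_iff (x : List Int) :
    checkDupLoop (PySem.List.sorted x (fun v => v) false) = false ↔ x.Nodup := by
  rw [dupLoop_iff _ (by simpa using PySem.List.sorted_pairwise x (fun v => v))]
  exact (PySem.List.sorted_perm x (fun v => v) false).nodup_iff

-- ===== VERDICT =====
theorem check_spec : Claim_equal_check := by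
  intro x fx n _
  unfold Spec_check check check_alt
  simp only [PySem.List.length_sorted]
  split_ifs with h1 h2
  · -- size/n validation fails: both return false
    simp only [Bool.or_eq_true, bne_iff_ne, ne_eq, decide_eq_true_eq] at h1
    symm
    simp only [Bool.and_eq_false_iff, beq_eq_false_iff_ne, ne_eq,
      decide_eq_false_iff_not, not_le]
    omega
  · -- duplicate found by A's adjacent scan: x is not Nodup, so len(set(x)) < len(x)
    have hnd : ¬ x.Nodup := fun h => by
      rw [(dup_sorted_iff x).mpr h] at h2; exact Bool.false_ne_true h2
    have hl : (PySem.Set.ofList x).length ≠ x.length :=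
      fun h => hnd ((ofList_length_iff x).mp h)
    symm
    simp only [Bool.and_eq_false_iff, beq_eq_false_iff_ne, ne_eq,
      decide_eq_false_iff_not, not_le]
    omega
  · -- both checks pass
    have hnd : x.Nodup := (dup_sorted_iff x).mp (Bool.not_eq_true _ ▸ by simpa using h2)
    have hofl := (ofList_length_iff x).mpr hnd
    have h1' : (x.length != fx.length) = false ∧ decide (x.length < 2) = false ∧
        decide (n > (x.length : Int) - 1) = false := by
      cases hb1 : (x.length != fx.length) <;> cases hb2 : decide (x.length < 2) <;>
        cases hb3 : decide (n > (x.length : Int) - 1) <;> simp_all <;> omega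
    obtain ⟨hb1, hb2, hb3⟩ := h1'
    simp only [bne_eq_false_iff_eq] at hb1
    simp only [decide_eq_false_iff_not, not_lt] at hb2 hb3
    symm
    simp only [Bool.and_eq_true, beq_iff_eq, decide_eq_true_eq]
    omega
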